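-- pv_equiv track=rewrite | github.com/CryptoDox/BruteForceCrack | crack_pass.py | get_transformations
-- ===== SOURCE A (Python) =====
-- def get_transformations(password, replacements, from_index):
-- 	if(from_index==len(replacements)):
-- 		return [password]
-- 	else:
-- 		res = []
-- 		nexts = get_transformations(password, replacements, from_index+1)
-- 		repl = replacements[from_index]
-- 		for t in nexts:
-- 			res.append(t)
-- 			transformation = t.replace(repl[0], repl[1])
-- 			if(transformation!=t):
-- 				res.append(transformation)
-- 		return res
-- ===== SOURCE B (Python) =====
-- def get_transformations(password, replacements, from_index):
-- 	res = [password]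
-- 	for i in range(len(replacements) - 1, from_index - 1, -1):
-- 		repl = replacements[i]
-- 		new = []
-- 		for t in res:
-- 			new.append(t)
-- 			transformation = t.replace(repl[0], repl[1])
-- 			if transformation != t:
-- 				new.append(transformation)
-- 		res = new
-- 	return res
-- ===== Notes on version B (the rewrite author's own statement) =====
-- stated objective: simpler
-- what changed: Replaced the recursion (one stack frame per remaining replacement) by a single iterative loop over the indices len-1 down to from_index that rebuilds the list in place, reproducing the recursion's unwind order without recursion.
import Mathlib
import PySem

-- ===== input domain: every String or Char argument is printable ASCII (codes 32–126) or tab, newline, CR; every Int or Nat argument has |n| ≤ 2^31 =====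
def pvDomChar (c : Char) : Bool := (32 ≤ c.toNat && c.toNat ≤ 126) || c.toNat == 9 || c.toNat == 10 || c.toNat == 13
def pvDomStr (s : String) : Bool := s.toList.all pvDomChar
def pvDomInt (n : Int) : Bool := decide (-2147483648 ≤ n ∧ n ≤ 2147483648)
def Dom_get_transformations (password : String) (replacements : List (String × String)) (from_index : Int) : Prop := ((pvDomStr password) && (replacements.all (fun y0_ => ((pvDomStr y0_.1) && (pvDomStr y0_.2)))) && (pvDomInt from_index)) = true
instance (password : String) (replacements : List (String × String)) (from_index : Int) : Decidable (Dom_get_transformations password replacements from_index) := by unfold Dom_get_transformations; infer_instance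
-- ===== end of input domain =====

-- B replaces A's recursion (one stack frame per remaining replacement) by a single
-- iterative countdown loop over the indices, reproducing the unwind order; objective: simpler.

-- ===== PORT A =====
-- the shared inner loop (textually identical in Source A and Source B):
-- res = []; for t in nexts: res.append(t); tr = t.replace(repl[0], repl[1]); if tr != t: res.append(tr)
def pvStep (repl : String × String) (nexts : List String) : List String :=
  nexts.foldl (fun res t =>
    let res := res ++ [t]
    let transformation := PySem.Str.replace t repl.1 repl.2
    if transformation ≠ t then res ++ [transformation] else res) []

def get_transformations (password : String) (replacements : List (String × String)) (from_index : Int) : List String :=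
  if from_index = (replacements.length : Int) then [password]
  else if (replacements.length : Int) < from_index then []
    -- totality guard only: here the Python recursion never terminates (RecursionError); outside Pre_
  else
    let nexts := get_transformations password replacements (from_index + 1)
    match PySem.List.pyGet? replacements from_index with
    | none => []      -- IndexError in Python; outside Pre_
    | some repl => pvStep repl nexts
termination_by ((replacements.length : Int) - from_index).toNat
decreasing_by omega

-- ===== PORT B =====
def get_transformations_alt (password : String) (replacements : List (String × String)) (from_index : Int) : List String :=
  (PySem.List.pyRange ((replacements.length : Int) - 1) (from_index - 1) (-1)).foldl
    (fun res i =>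
      match PySem.List.pyGet? replacements i with
      | none => []      -- IndexError in Python; outside Pre_
      | some repl => pvStep repl res)
    [password]

-- ===== PRECONDITION & SPEC =====
-- Pre_ excludes exactly the inputs where the Python A raises: from_index > len
-- (unbounded recursion, RecursionError) and from_index < -len (IndexError).
def Pre_get_transformations (password : String) (replacements : List (String × String)) (from_index : Int) : Prop :=
  -(replacements.length : Int) ≤ from_index ∧ from_index ≤ (replacements.length : Int)
instance (password : String) (replacements : List (String × String)) (from_index : Int) : Decidable (Pre_get_transformations password replacements from_index) := by unfold Pre_get_transformations; infer_instance

def pvWitness_get_transformations : String × (List (String × String)) × Int := ("abcab", [("a", "x"), ("b", "y")], 0)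

def Spec_get_transformations (password : String) (replacements : List (String × String)) (from_index : Int) (out : List String) : Prop := out = get_transformations_alt password replacements from_index
instance (password : String) (replacements : List (String × String)) (from_index : Int) (out : List String) : Decidable (Spec_get_transformations password replacements from_index out) := by unfold Spec_get_transformations; infer_instance

-- ===== CLAIM (what is proved, stated in full; the proofs are below) =====
def Claim_equal_get_transformations : Prop := ∀ (password : String) (replacements : List (String × String)) (from_index : Int), Dom_get_transformations password replacements from_index → Pre_get_transformations password replacements from_index → Spec_get_transformations password replacements from_index (get_transformations password replacements from_index)


-- ===== LEMMAS AND PROOFS =====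

-- splitting the countdown index list at its last element
lemma pyRange_neg_one_snoc (a b : Int) (h : b < a) :
    PySem.List.pyRange a b (-1) = PySem.List.pyRange a (b + 1) (-1) ++ [b + 1] := by
  rw [PySem.List.pyRange_neg_one_eq_reverse, PySem.List.pyRange_neg_one_eq_reverse,
    PySem.List.pyRange_one_cons (by omega : b + 1 < a + 1), List.reverse_cons]

-- the main invariant: A's recursion from index i equals B's fold over the countdown list ending at i
lemma main_inv (password : String) (replacements : List (String × String)) :
    ∀ (i : Int), -(replacements.length : Int) ≤ i → i ≤ (replacements.length : Int) →
      get_transformations password replacements i =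
      (PySem.List.pyRange ((replacements.length : Int) - 1) (i - 1) (-1)).foldl
        (fun res j =>
          match PySem.List.pyGet? replacements j with
          | none => []
          | some repl => pvStep repl res)
        [password] := by
  intro i hlo hhi
  set n : Int := (replacements.length : Int) with hn
  have hm : (n - i).toNat ≤ (n - i).toNat := le_refl _
  generalize hk : (n - i).toNat = k at hm
  clear hm
  induction k generalizing i with
  | zero =>
    have hi : i = n := by omega
    subst hi
    rw [get_transformations, if_pos rfl,
      PySem.List.pyRange_neg_one_eq_nil (by omega : n - 1 ≤ n - 1), List.foldl_nil]
  | succ k ih =>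
    by_cases hin : i = n
    · subst hin
      rw [get_transformations, if_pos rfl,
        PySem.List.pyRange_neg_one_eq_nil (by omega : n - 1 ≤ n - 1), List.foldl_nil]
    · have hlt : i < n := lt_of_le_of_ne hhi hin
      rw [get_transformations, if_neg hin, if_neg (by omega : ¬ n < i)]
      have hsnoc := pyRange_neg_one_snoc (n - 1) (i - 1) (by omega)
      have : i - 1 + 1 = i := by omega
      rw [this] at hsnoc
      have ihh := ih (i + 1) (by omega) (by omega) (by omega)
      rw [show i + 1 - 1 = i from by omega] at ihh
      rw [hsnoc, List.foldl_append, List.foldl_cons, List.foldl_nil, ← ihh]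

-- ===== VERDICT (by name: the statement is the Claim_ definition above) =====
theorem get_transformations_spec : Claim_equal_get_transformations := by
  intro password replacements from_index _ hpre
  unfold Spec_get_transformations get_transformations_alt
  exact main_inv password replacements from_index hpre.1 hpre.2
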